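-- pv_equiv track=rewrite | github.com/Efemirkan/ner-comparison-project | src/entity_level_eval.py | rebuild_sequences
-- ===== SOURCE A (Python) =====
-- def rebuild_sequences(flat_predictions, true_sentences):
--
--     rebuilt = []
--     index = 0 # Keep track index for sentence boundiries
--
--     for sent in true_sentences:
--         sent_len = len(sent) # Have each sentence length
--
--         # Extract sentences using initial index to end of the sentence
--         rebuilt.append(list(flat_predictions[index: index + sent_len]))
--
--         index += sent_len # Update index value
--
--     return rebuilt
-- ===== SOURCE B (Python) =====
-- def rebuild_sequences(flat_predictions, true_sentences):
--     # Scatter approach: no slicing at all. Each flat token is assigned to the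
--     # sentence that owns its position, and appended to that sentence's bucket.
--     out = [[] for _ in true_sentences]
--     owners = [j for j, sent in enumerate(true_sentences) for _ in sent]
--     for j, tok in zip(owners, flat_predictions):
--         out[j].append(tok)
--     return out
-- ===== Notes on version B (the rewrite author's own statement) =====
-- stated objective: alternative
-- what changed: B replaces A's slice-per-sentence loop with a scatter algorithm: it builds an owner index mapping each flat position to its sentence, then distributes tokens into pre-created per-sentence buckets with zip truncation handling short flat lists; no slicing occurs.
import Mathlib
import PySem

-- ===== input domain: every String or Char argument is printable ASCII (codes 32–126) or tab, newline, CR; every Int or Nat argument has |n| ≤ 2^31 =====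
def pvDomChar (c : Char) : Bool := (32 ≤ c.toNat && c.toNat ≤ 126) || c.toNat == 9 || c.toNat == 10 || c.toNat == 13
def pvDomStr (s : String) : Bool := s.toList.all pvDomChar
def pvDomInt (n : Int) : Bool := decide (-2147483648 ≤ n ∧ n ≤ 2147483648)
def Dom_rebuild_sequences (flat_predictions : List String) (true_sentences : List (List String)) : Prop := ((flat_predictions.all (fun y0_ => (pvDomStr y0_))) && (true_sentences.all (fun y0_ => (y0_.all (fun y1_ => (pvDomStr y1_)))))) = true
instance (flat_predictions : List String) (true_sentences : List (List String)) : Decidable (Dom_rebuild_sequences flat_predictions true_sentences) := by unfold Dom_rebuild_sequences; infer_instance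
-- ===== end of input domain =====

-- B is a scatter algorithm: it maps each flat position to its owning sentence and distributes
-- tokens into pre-created per-sentence buckets; no slicing and no running index (objective: alternative).

-- ===== PORT A =====
def rebuild_sequences (flat_predictions : List String) (true_sentences : List (List String)) : List (List String) :=
  -- rebuilt = []; index = 0; for sent in true_sentences: rebuilt.append(list(flat[index:index+len(sent)])); index += len(sent)
  (true_sentences.foldl
    (fun (st : List (List String) × Int) sent =>
      (st.1 ++ [PySem.List.slice flat_predictions (some st.2) (some (st.2 + sent.length))],
       st.2 + sent.length))
    ([], 0)).1

-- ===== PORT B =====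
def rebuild_sequences_alt (flat_predictions : List String) (true_sentences : List (List String)) : List (List String) :=
  -- out = [[] for _ in true_sentences]
  let out : List (List String) := true_sentences.map (fun _ => [])
  -- owners = [j for j, sent in enumerate(true_sentences) for _ in sent]
  let owners : List Int :=
    (PySem.List.enumerate true_sentences 0).flatMap (fun p => List.replicate p.2.length p.1)
  -- for j, tok in zip(owners, flat_predictions): out[j].append(tok)
  -- (j comes from enumerate, so j ≥ 0: out[j] is a plain non-negative index access, hence .toNat is exact)
  (owners.zip flat_predictions).foldl (fun o p => o.modify p.1.toNat (· ++ [p.2])) out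

-- ===== PRECONDITION & SPEC =====
def Spec_rebuild_sequences (flat_predictions : List String) (true_sentences : List (List String)) (out : List (List String)) : Prop := out = rebuild_sequences_alt flat_predictions true_sentences
instance (flat_predictions : List String) (true_sentences : List (List String)) (out : List (List String)) : Decidable (Spec_rebuild_sequences flat_predictions true_sentences out) := by unfold Spec_rebuild_sequences; infer_instance

-- ===== CLAIM (what is proved, stated in full; the proofs are below) =====
def Claim_equal_rebuild_sequences : Prop := ∀ (flat_predictions : List String) (true_sentences : List (List String)), Dom_rebuild_sequences flat_predictions true_sentences → Spec_rebuild_sequences flat_predictions true_sentences (rebuild_sequences flat_predictions true_sentences)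

-- ===== LEMMAS AND PROOFS =====

-- the take/drop characterisation both programs are reduced to
def pvChunks : List String → List (List String) → List (List String)
  | _, [] => []
  | flat, s :: r => flat.take s.length :: pvChunks (flat.drop s.length) r

-- the slices A's loop appends starting from running index i
def pvSlices (flat : List String) : Int → List (List String) → List (List String)
  | _, [] => []
  | i, s :: r => PySem.List.slice flat (some i) (some (i + s.length)) :: pvSlices flat (i + s.length) r

theorem pvA_fold (flat : List String) (ts : List (List String)) :
    ∀ (acc : List (List String)) (i : Int),
      (ts.foldl
        (fun (st : List (List String) × Int) sent =>
          (st.1 ++ [PySem.List.slice flat (some st.2) (some (st.2 + sent.length))],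
           st.2 + sent.length)) (acc, i)).1 = acc ++ pvSlices flat i ts := by
  induction ts with
  | nil => intro acc i; simp [pvSlices]
  | cons s r ih =>
      intro acc i
      simp only [List.foldl_cons, ih, pvSlices, List.append_assoc, List.singleton_append]

theorem pvSlices_eq_chunks (flat : List String) (ts : List (List String)) :
    ∀ (k : Nat), pvSlices flat (k : Int) ts = pvChunks (flat.drop k) ts := by
  induction ts with
  | nil => intro k; simp [pvSlices, pvChunks]
  | cons s r ih =>
      intro k
      have h1 : ((k : Int) + (s.length : Int)) = ((k + s.length : Nat) : Int) := by push_cast; ring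
      simp only [pvSlices, pvChunks]
      rw [PySem.List.slice_natCast_add flat k s.length, h1, ih (k + s.length), List.drop_drop,
        Nat.add_comm]

-- B-side helpers
theorem pvZip_append_left {α β : Type} (as bs : List α) :
    ∀ (cs : List β), (as ++ bs).zip cs = as.zip cs ++ bs.zip (cs.drop as.length) := by
  induction as with
  | nil => intro cs; simp
  | cons a as' ih =>
      intro cs
      cases cs with
      | nil => simp
      | cons c cs' => simp [List.zip_cons_cons, ih cs']

theorem pvModify_append_nil {α : Type} (l : List (List α)) :
    ∀ (k : Nat), l.modify k (· ++ ([] : List α)) = l := by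
  intro k
  have h : (fun x : List α => x ++ []) = id := funext (fun x => List.append_nil x)
  rw [h, List.modify_id]

theorem pvModify_modify {α : Type} (f g : α → α) :
    ∀ (l : List α) (k : Nat), (l.modify k f).modify k g = l.modify k (fun x => g (f x)) := by
  intro l
  induction l with
  | nil => intro k; simp
  | cons x xs ih =>
      intro k
      cases k with
      | zero => simp
      | succ k' => simp [List.modify_succ_cons, ih k']

theorem pvModify_at_length {α : Type} (x : α) (rest : List α) (f : α → α) :
    ∀ (pre : List α), (pre ++ x :: rest).modify pre.length f = pre ++ f x :: rest := by
  intro pre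
  induction pre with
  | nil => simp
  | cons p ps ih => simp [List.modify_succ_cons, ih]

-- the scatter step of B's loop
theorem pvScatter_replicate (n : Nat) :
    ∀ (flat : List String) (out : List (List String)) (k : Nat),
      ((List.replicate n ((k : Nat) : Int)).zip flat).foldl
        (fun o p => o.modify p.1.toNat (· ++ [p.2])) out
      = out.modify k (· ++ flat.take n) := by
  induction n with
  | zero =>
      intro flat out k
      simp only [List.replicate_zero, List.zip_nil_left, List.foldl_nil, List.take_zero]
      exact (pvModify_append_nil out k).symm
  | succ n' ih =>
      intro flat out k
      cases flat with
      | nil =>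
          simp only [List.zip_nil_right, List.foldl_nil, List.take_nil]
          exact (pvModify_append_nil out k).symm
      | cons t fr =>
          simp only [List.replicate_succ, List.zip_cons_cons, List.foldl_cons, Int.toNat_natCast,
            ih fr, pvModify_modify, List.take_succ_cons]
          congr 1
          funext x
          simp

-- B's owner list for a sentence suffix, with an explicit start index
def pvOwners : Nat → List (List String) → List Int
  | _, [] => []
  | k, s :: r => List.replicate s.length ((k : Nat) : Int) ++ pvOwners (k + 1) r

theorem pvOwners_eq (ts : List (List String)) :
    ∀ (k : Nat),
      (PySem.List.enumerate ts (k : Int)).flatMap (fun p => List.replicate p.2.length p.1)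
      = pvOwners k ts := by
  induction ts with
  | nil => intro k; simp [PySem.List.enumerate_nil, pvOwners]
  | cons s r ih =>
      intro k
      have h1 : ((k : Int) + 1) = ((k + 1 : Nat) : Int) := by push_cast; ring
      simp only [PySem.List.enumerate_cons, List.flatMap_cons, pvOwners, h1, ih (k + 1)]

theorem pvScatter_main (ts : List (List String)) :
    ∀ (flat : List String) (pre : List (List String)),
      ((pvOwners pre.length ts).zip flat).foldl
        (fun o p => o.modify p.1.toNat (· ++ [p.2])) (pre ++ ts.map (fun _ => []))
      = pre ++ pvChunks flat ts := by
  induction ts with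
  | nil => intro flat pre; simp [pvOwners, pvChunks]
  | cons s r ih =>
      intro flat pre
      rw [pvOwners, pvZip_append_left, List.foldl_append]
      rw [List.length_replicate, pvScatter_replicate s.length flat _ pre.length]
      have hmod : (pre ++ (s :: r).map (fun _ => ([] : List String))).modify pre.length
          (· ++ flat.take s.length) = (pre ++ [flat.take s.length]) ++ r.map (fun _ => []) := by
        simp only [List.map_cons]
        rw [pvModify_at_length]
        simp
      rw [hmod]
      have hlen : pre.length + 1 = (pre ++ [flat.take s.length]).length := by simp
      rw [hlen, ih (flat.drop s.length) (pre ++ [flat.take s.length])]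
      simp [pvChunks]

-- ===== VERDICT (by name: the statement is the Claim_ definition above) =====
theorem rebuild_sequences_spec : Claim_equal_rebuild_sequences := by
  intro flat ts _
  unfold Spec_rebuild_sequences rebuild_sequences rebuild_sequences_alt
  rw [pvA_fold]
  simp only [List.nil_append]
  have hA : pvSlices flat (0 : Int) ts = pvChunks flat ts := by
    have := pvSlices_eq_chunks flat ts 0
    simpa using this
  have h0 : ((0 : Int)) = ((0 : Nat) : Int) := by norm_num
  have hB := pvScatter_main ts flat []
  simp only [List.nil_append, List.length_nil] at hB
  have hOwn := pvOwners_eq ts 0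
  simp only [Nat.cast_zero] at hOwn
  rw [hA, hOwn]
  exact hB.symm
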